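-- pv_equiv track=rewrite | github.com/mahsanghani/Stock_Predictions | Email_Stocks.py | sort_today
-- ===== SOURCE A (Python) =====
-- def sort_today(stocks):
--     sorted = []
--     for stock in stocks:
--         if stock[4] == 'After Market Close':
--             sorted.append(stock)
--     for stock in stocks:
--         if stock[4] == 'Time Not Supplied':
--             sorted.append(stock)
--     return sorted
-- ===== SOURCE B (Python) =====
-- def sort_today(stocks):
--     order = {'After Market Close': 0, 'Time Not Supplied': 1}
--     kept = [stock for stock in stocks if stock[4] in order]
--     return sorted(kept, key=lambda stock: order[stock[4]])
-- ===== Notes on version B (the rewrite author's own statement) =====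
-- stated objective: alternative
-- what changed: A's two full ordered passes over stocks are replaced by a single filter of the rows with a recognised timing label followed by a stable sort on a 0/1 key (0 = 'After Market Close', 1 = 'Time Not Supplied'); stability reproduces A's grouped order exactly.
import Mathlib
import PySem

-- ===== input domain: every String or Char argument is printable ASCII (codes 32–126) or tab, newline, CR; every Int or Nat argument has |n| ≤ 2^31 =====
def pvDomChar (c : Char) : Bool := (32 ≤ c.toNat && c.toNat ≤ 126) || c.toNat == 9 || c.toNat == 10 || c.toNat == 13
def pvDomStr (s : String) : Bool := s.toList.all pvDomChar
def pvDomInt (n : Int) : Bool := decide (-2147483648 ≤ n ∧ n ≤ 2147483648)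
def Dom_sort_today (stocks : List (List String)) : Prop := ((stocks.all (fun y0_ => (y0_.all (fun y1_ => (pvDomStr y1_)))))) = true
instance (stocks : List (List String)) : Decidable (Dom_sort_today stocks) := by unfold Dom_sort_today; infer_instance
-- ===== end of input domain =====

-- B replaces A's two full passes over `stocks` by one filter pass plus a stable keyed sort
-- (key 0 for 'After Market Close', 1 for 'Time Not Supplied'); objective: alternative/idiomatic.


-- ===== PORT A =====
-- A: two passes, appending first the 'After Market Close' rows, then the 'Time Not Supplied' rows.
-- stock[4] is PySem.List.pyGetD stock 4 "" — exact under Pre_ (every row has length ≥ 5).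
def sort_today (stocks : List (List String)) : List (List String) :=
  let s1 := stocks.foldl
    (fun acc stock => if PySem.List.pyGetD stock 4 "" = "After Market Close" then acc ++ [stock] else acc) []
  stocks.foldl
    (fun acc stock => if PySem.List.pyGetD stock 4 "" = "Time Not Supplied" then acc ++ [stock] else acc) s1

-- ===== PORT B =====
-- B: filter the rows with a recognised label, then stable-sort by a 0/1 key.
def sortTodayKey (stock : List String) : Int :=
  if PySem.List.pyGetD stock 4 "" = "After Market Close" then 0 else 1

def sort_today_alt (stocks : List (List String)) : List (List String) :=
  let kept := stocks.filter (fun stock =>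
    PySem.List.pyGetD stock 4 "" = "After Market Close" ∨ PySem.List.pyGetD stock 4 "" = "Time Not Supplied")
  PySem.List.sorted kept sortTodayKey

-- ===== PRECONDITION & SPEC =====
-- Pre_ excludes exactly the inputs where some row is shorter than 5 entries: there the Python A
-- (and B alike) raises IndexError on stock[4].
def Pre_sort_today (stocks : List (List String)) : Prop := ∀ st ∈ stocks, 5 ≤ st.length
instance (stocks : List (List String)) : Decidable (Pre_sort_today stocks) := by unfold Pre_sort_today; infer_instance

def pvWitness_sort_today : List (List String) :=
  [["A", "B", "C", "D", "Time Not Supplied"], ["A", "B", "C", "D", "After Market Close"]]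

def Spec_sort_today (stocks : List (List String)) (out : List (List String)) : Prop := out = sort_today_alt stocks
instance (stocks : List (List String)) (out : List (List String)) : Decidable (Spec_sort_today stocks out) := by unfold Spec_sort_today; infer_instance

-- ===== CLAIM (what is proved, stated in full; the proofs are below) =====
def Claim_equal_sort_today : Prop := ∀ (stocks : List (List String)), Dom_sort_today stocks → Pre_sort_today stocks → Spec_sort_today stocks (sort_today stocks)

-- ===== LEMMAS AND PROOFS =====

-- insertBy walks past a prefix none of whose elements x goes before
lemma insertBy_append_not_before {α : Type} (before : α → α → Bool) (x : α) (l1 l2 : List α)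
    (h : ∀ y ∈ l1, before x y = false) :
    PySem.List.insertBy before x (l1 ++ l2) = l1 ++ PySem.List.insertBy before x l2 := by
  induction l1 with
  | nil => simp
  | cons y ys ih =>
    have hy := h y (by simp)
    simp [PySem.List.insertBy, hy, ih (fun z hz => h z (by simp [hz]))]

-- insertBy puts x in front when x goes before every element
lemma insertBy_all_before {α : Type} (before : α → α → Bool) (x : α) (l : List α)
    (h : ∀ y ∈ l, before x y = true) :
    PySem.List.insertBy before x l = x :: l := by
  cases l with
  | nil => simp [PySem.List.insertBy]
  | cons y ys => simp [PySem.List.insertBy, h y (by simp)]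

-- invariant of the insertion-sort fold for a two-valued key: the accumulator stays
-- (key-0 bucket) ++ (key-1 bucket), each in arrival order
lemma foldl_insertBy_two_bucket {α : Type} (key : α → Int) (xs acc0 acc1 : List α)
    (hx : ∀ x ∈ xs, key x = 0 ∨ key x = 1)
    (h0 : ∀ x ∈ acc0, key x = 0) (h1 : ∀ x ∈ acc1, key x = 1) :
    xs.foldl (fun acc x => PySem.List.insertBy (fun a b => decide (key a < key b)) x acc) (acc0 ++ acc1)
      = (acc0 ++ xs.filter (fun x => key x == 0)) ++ (acc1 ++ xs.filter (fun x => key x == 1)) := by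
  induction xs generalizing acc0 acc1 with
  | nil => simp
  | cons x t ih =>
    have hxk := hx x (by simp)
    have ht : ∀ y ∈ t, key y = 0 ∨ key y = 1 := fun y hy => hx y (by simp [hy])
    rcases hxk with hk | hk
    · -- key x = 0: insert at the end of bucket 0
      have step : PySem.List.insertBy (fun a b => decide (key a < key b)) x (acc0 ++ acc1)
          = (acc0 ++ [x]) ++ acc1 := by
        rw [insertBy_append_not_before _ _ _ _ (fun y hy => by simp [hk, h0 y hy]),
            insertBy_all_before _ _ _ (fun y hy => by simp [hk, h1 y hy])]
        simp
      simp only [List.foldl_cons, step]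
      rw [ih (acc0 ++ [x]) acc1 ht
            (fun y hy => by rcases List.mem_append.1 hy with h | h; exact h0 y h; simp_all)
            h1]
      simp [hk]
    · -- key x = 1: insert at the very end
      have step : PySem.List.insertBy (fun a b => decide (key a < key b)) x (acc0 ++ acc1)
          = acc0 ++ (acc1 ++ [x]) := by
        rw [PySem.List.insertBy_of_forall_not_before _ _ _ (fun y hy => by
          rcases List.mem_append.1 hy with h | h
          · simp [hk, h0 y h]
          · simp [hk, h1 y h])]
        simp
      simp only [List.foldl_cons, step]
      rw [ih acc0 (acc1 ++ [x]) ht h0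
            (fun y hy => by rcases List.mem_append.1 hy with h | h; exact h1 y h; simp_all)]
      simp [hk]

-- ===== VERDICT (by name: the statement is the Claim_ definition above) =====
theorem sort_today_spec : Claim_equal_sort_today := by
  intro stocks _ _
  unfold Spec_sort_today sort_today sort_today_alt
  rw [PySem.List.sorted_eq_foldl_insertBy]
  have hb := foldl_insertBy_two_bucket sortTodayKey
    (stocks.filter (fun stock =>
      PySem.List.pyGetD stock 4 "" = "After Market Close" ∨ PySem.List.pyGetD stock 4 "" = "Time Not Supplied"))
    [] []
    (fun x _ => by unfold sortTodayKey; split_ifs <;> simp)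
    (by simp) (by simp)
  simp only [List.nil_append, List.append_nil] at hb
  rw [hb]
  have eA : stocks.foldl
      (fun acc stock => if PySem.List.pyGetD stock 4 "" = "After Market Close" then acc ++ [stock] else acc) []
      = stocks.filter (fun st => decide (PySem.List.pyGetD st 4 "" = "After Market Close")) := by
    simpa using PySem.List.foldl_append_if
      (fun st => decide (PySem.List.pyGetD st 4 "" = "After Market Close")) id stocks []
  have eT : ∀ init : List (List String), stocks.foldl
      (fun acc stock => if PySem.List.pyGetD stock 4 "" = "Time Not Supplied" then acc ++ [stock] else acc) init
      = init ++ stocks.filter (fun st => decide (PySem.List.pyGetD st 4 "" = "Time Not Supplied")) := by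
    intro init
    simpa using PySem.List.foldl_append_if
      (fun st => decide (PySem.List.pyGetD st 4 "" = "Time Not Supplied")) id stocks init
  rw [eT, eA, List.filter_filter, List.filter_filter]
  congr 1
  · apply List.filter_congr
    intro x _
    unfold sortTodayKey
    by_cases h : PySem.List.pyGetD x 4 "" = "After Market Close" <;> simp [h]
  · apply List.filter_congr
    intro x _
    unfold sortTodayKey
    by_cases h : PySem.List.pyGetD x 4 "" = "After Market Close" <;> simp [h]
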